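-- pv_equiv track=rewrite | github.com/joshua-linsanity/public-key-cryptosystems | elgamal_alice.py | septemvigesimal
-- ===== SOURCE A (Python) =====
-- def septemvigesimal(m: int, case: str):
--     decrypted_message = ""
--
--     # count from last to first char
--     while True:
--         remainder = m % 27
--
--         if 1 <= remainder <= 26:
--             decrypted_message += chr((remainder + 64))
--         else:
--             # must be space; remainder = 0
--             decrypted_message += chr(32)
--
--         # if floor function is 0, then no more digits
--         m //= 27
--         if m == 0:
--             break
--
--     # reverse so it becomes first to last
--     not_reversed = decrypted_message[::-1]
--     secret = ""
--
--     for idx, val in enumerate(case):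
--         # default is upper, change to lower
--         if val == '0':
--             character = not_reversed[idx].lower()
--             secret += character
--         else:
--             secret += not_reversed[idx]
--     return secret
-- ===== SOURCE B (Python) =====
-- def septemvigesimal(m: int, case: str):
--     # most-significant-first digit extraction by divide-by-base recursion (no reversal step)
--     def digits(n):
--         if n < 27:
--             return [n]
--         return digits(n // 27) + [n % 27]
--
--     chars = [chr(d + 64) if 1 <= d <= 26 else chr(32) for d in digits(m)]
--     return ''.join(chars[i].lower() if v == '0' else chars[i] for i, v in enumerate(case))
-- ===== Notes on version B (the rewrite author's own statement) =====
-- stated objective: alternative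
-- what changed: Replaces the build-LSB-first-then-reverse while-loop and character-appending for-loop with a most-significant-first divide-by-base recursion producing the digit list in final order plus a single join over a comprehension.
-- outside the precondition, e.g. on septemvigesimal(-1, 'A'): A does not finish within the time limit, B returns ' '; on septemvigesimal(5, 'AA'): A raises IndexError, B raises IndexError
import Mathlib
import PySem

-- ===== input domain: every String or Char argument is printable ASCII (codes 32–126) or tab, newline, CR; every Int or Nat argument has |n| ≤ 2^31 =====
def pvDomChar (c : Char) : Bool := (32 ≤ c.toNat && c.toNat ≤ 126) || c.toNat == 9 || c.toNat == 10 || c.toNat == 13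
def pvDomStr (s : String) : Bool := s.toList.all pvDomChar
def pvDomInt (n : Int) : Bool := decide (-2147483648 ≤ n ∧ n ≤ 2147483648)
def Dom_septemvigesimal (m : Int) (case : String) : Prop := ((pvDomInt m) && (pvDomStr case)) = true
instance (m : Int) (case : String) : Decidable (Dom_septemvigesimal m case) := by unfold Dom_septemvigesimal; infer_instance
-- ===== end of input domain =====

-- B decodes the base-27 digits most-significant-first by a divide-by-base recursion (no reversal
-- step) and renders the cased string with a single map over enumerate(case): alternative decomposition.


-- ===== PORT A =====
-- the while-True loop: append chr of each remainder (least significant first), divide, break at 0.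
-- fuel (m.toNat + 1 at the call site) is a totality guard only; it is never exhausted for 0 ≤ m
-- (for m < 0 the Python loop never terminates — excluded by Pre_).
def pvALoop : Nat → Int → List Char → List Char
  | 0, _, dm => dm
  | fuel + 1, m, dm =>
    let r := PySem.Int.mod m 27
    let dm' := if 1 ≤ r ∧ r ≤ 26 then dm ++ [Char.ofNat (r + 64).toNat] else dm ++ [Char.ofNat 32]
    let m' := PySem.Int.floordiv m 27
    if m' = 0 then dm' else pvALoop fuel m' dm'

-- the 'for idx, val in enumerate(case)' loop; 'none' is Python's IndexError (excluded by Pre_)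
def pvAFor (nr : List Char) : List (Int × Char) → List Char → List Char
  | [], secret => secret
  | (idx, val) :: rest, secret =>
    match PySem.List.pyGet? nr idx with
    | none => secret
    | some ch =>
      if val = '0' then pvAFor nr rest (secret ++ [PySem.Chars.lowerChar ch])
      else pvAFor nr rest (secret ++ [ch])

def septemvigesimal (m : Int) (case : String) : String :=
  let dm := pvALoop (m.toNat + 1) m []
  let nr := (PySem.List.slice? dm none none (-1)).getD []   -- decrypted_message[::-1]
  String.ofList (pvAFor nr (PySem.List.enumerate case.toList 0) [])

-- ===== PORT B =====
-- digits(n): most-significant-first base-27 digits by divide-by-base recursion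
def pvDigitsB (m : Int) : List Int :=
  if m < 27 then [m]
  else pvDigitsB (PySem.Int.floordiv m 27) ++ [PySem.Int.mod m 27]
termination_by m.toNat
decreasing_by
  rw [PySem.Int.floordiv_eq_ediv_of_pos (by omega : (0:Int) < 27)]
  omega

def septemvigesimal_alt (m : Int) (case : String) : String :=
  let chars := (pvDigitsB m).map
    (fun d => if 1 ≤ d ∧ d ≤ 26 then Char.ofNat (d + 64).toNat else Char.ofNat 32)
  -- join over the comprehension; '.getD' stands where chars[i] would raise IndexError (excluded by Pre_)
  String.ofList ((PySem.List.enumerate case.toList 0).map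
    (fun p => if p.2 = '0' then PySem.Chars.lowerChar ((PySem.List.pyGet? chars p.1).getD (Char.ofNat 32))
              else (PySem.List.pyGet? chars p.1).getD (Char.ofNat 32)))

-- ===== PRECONDITION & SPEC =====
-- Pre_ excludes m < 0 (A's while-loop never terminates there) and case longer than the number of
-- base-27 digits of m (A's not_reversed[idx] raises IndexError there): len ≤ number of digits
-- iff len ≤ 1 or 27^(len-1) ≤ m.
def Pre_septemvigesimal (m : Int) (case : String) : Prop :=
  0 ≤ m ∧ (case.toList.length ≤ 1 ∨ (27 : Int) ^ (case.toList.length - 1) ≤ m)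
instance (m : Int) (case : String) : Decidable (Pre_septemvigesimal m case) := by
  unfold Pre_septemvigesimal; infer_instance

def pvWitness_septemvigesimal : Int × String := (28, "00")

def Spec_septemvigesimal (m : Int) (case : String) (out : String) : Prop := out = septemvigesimal_alt m case
instance (m : Int) (case : String) (out : String) : Decidable (Spec_septemvigesimal m case out) := by unfold Spec_septemvigesimal; infer_instance

-- ===== CLAIM (what is proved, stated in full; the proofs are below) =====
def Claim_equal_septemvigesimal : Prop := ∀ (m : Int) (case : String), Dom_septemvigesimal m case → Pre_septemvigesimal m case → Spec_septemvigesimal m case (septemvigesimal m case)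

-- ===== LEMMAS AND PROOFS =====

-- the shared per-digit rendering
def pvF (d : Int) : Char := if 1 ≤ d ∧ d ≤ 26 then Char.ofNat (d + 64).toNat else Char.ofNat 32

lemma pvDigitsB_length_pos (m : Int) : 0 < (pvDigitsB m).length := by
  rw [pvDigitsB]
  split <;> simp

lemma pvDigitsB_length_ge (k : Nat) : ∀ (m : Int), 0 ≤ m → (27 : Int) ^ k ≤ m →
    k + 1 ≤ (pvDigitsB m).length := by
  induction k with
  | zero => intro m _ _; exact pvDigitsB_length_pos m
  | succ k ih =>
    intro m hm hpow
    have h27 : ¬ m < 27 := by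
      have : (27 : Int) ≤ 27 ^ (k + 1) := by
        calc (27 : Int) = 27 ^ 1 := (pow_one _).symm
        _ ≤ 27 ^ (k + 1) := pow_le_pow_right₀ (by omega) (by omega)
      omega
    rw [pvDigitsB, if_neg h27, List.length_append]
    have hdvd : (27 : Int) ^ k ≤ PySem.Int.floordiv m 27 := by
      rw [PySem.Int.floordiv_eq_ediv_of_pos (by omega)]
      rw [Int.le_ediv_iff_mul_le (by omega)]
      calc (27:Int) ^ k * 27 = 27 ^ (k + 1) := by ring
      _ ≤ m := hpow
    have := ih (PySem.Int.floordiv m 27) (le_trans (by positivity) hdvd) hdvd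
    simp only [List.length_cons, List.length_nil]
    omega

lemma pvIteAppend (dm : List Char) (r : Int) :
    (if 1 ≤ r ∧ r ≤ 26 then dm ++ [Char.ofNat (r + 64).toNat] else dm ++ [Char.ofNat 32])
      = dm ++ [pvF r] := by
  unfold pvF; split <;> rfl

lemma pvALoop_eq (n : Nat) : ∀ (m : Int), 0 ≤ m → m.toNat = n → ∀ (fuel : Nat), n < fuel →
    ∀ (acc : List Char), pvALoop fuel m acc = acc ++ ((pvDigitsB m).map pvF).reverse := by
  induction n using Nat.strong_induction_on with
  | _ n ih =>
    intro m hm hmn fuel hfuel acc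
    obtain ⟨fuel, rfl⟩ : ∃ f, fuel = f + 1 := ⟨fuel - 1, by omega⟩
    by_cases h27 : m < 27
    · have hr : PySem.Int.mod m 27 = m := by
        rw [PySem.Int.mod_eq_emod_of_pos (by omega)]
        omega
      have hq : PySem.Int.floordiv m 27 = 0 := by
        rw [PySem.Int.floordiv_eq_ediv_of_pos (by omega)]
        omega
      rw [pvALoop]
      conv_lhs => rw [pvIteAppend, hr, hq]
      rw [if_pos rfl]
      conv_rhs => rw [pvDigitsB, if_pos h27]
      simp
    · have hq0 : 1 ≤ PySem.Int.floordiv m 27 := by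
        rw [PySem.Int.floordiv_eq_ediv_of_pos (by omega)]
        rw [Int.le_ediv_iff_mul_le (by omega)]
        omega
      have hqlt : PySem.Int.floordiv m 27 < m := by
        rw [PySem.Int.floordiv_eq_ediv_of_pos (by omega)]
        omega
      rw [pvALoop]
      conv_lhs => rw [pvIteAppend]
      rw [if_neg (by omega : ¬ PySem.Int.floordiv m 27 = 0)]
      rw [ih (PySem.Int.floordiv m 27).toNat (by omega) _ (by omega) rfl fuel (by omega)]
      conv_rhs => rw [pvDigitsB, if_neg h27]
      simp

lemma pvMem_enumerate_bounds {α : Type} : ∀ (xs : List α) (s : Int) (p : Int × α),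
    p ∈ PySem.List.enumerate xs s → s ≤ p.1 ∧ p.1 < s + xs.length := by
  intro xs
  induction xs with
  | nil => intro s p hp; simp [PySem.List.enumerate_nil] at hp
  | cons x xs ih =>
    intro s p hp
    rw [PySem.List.enumerate_cons] at hp
    rcases List.mem_cons.mp hp with h | h
    · subst h; simp
    · have := ih (s + 1) p h
      simp only [List.length_cons]
      push_cast
      push_cast at this
      omega

lemma pvAFor_eq (nr : List Char) : ∀ (ps : List (Int × Char)) (secret : List Char),
    (∀ p ∈ ps, 0 ≤ p.1 ∧ p.1 < nr.length) →
    pvAFor nr ps secret = secret ++ ps.map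
      (fun p => if p.2 = '0' then PySem.Chars.lowerChar ((PySem.List.pyGet? nr p.1).getD (Char.ofNat 32))
                else (PySem.List.pyGet? nr p.1).getD (Char.ofNat 32)) := by
  intro ps
  induction ps with
  | nil => intro secret _; simp [pvAFor]
  | cons p ps ih =>
    intro secret hmem
    obtain ⟨idx, val⟩ := p
    have hb := hmem (idx, val) (List.mem_cons_self ..)
    have hget : PySem.List.pyGet? nr idx = some nr[idx.toNat] :=
      PySem.List.pyGet?_eq_some_getElem nr hb.1 (by exact_mod_cast hb.2)
    rw [pvAFor, hget]
    have hrest : ∀ p ∈ ps, 0 ≤ p.1 ∧ p.1 < (nr.length : Int) :=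
      fun p hp => hmem p (List.mem_cons_of_mem _ hp)
    by_cases hv : val = '0' <;>
      simp [hv, ih _ hrest, hget]

theorem septemvigesimal_spec : Claim_equal_septemvigesimal := by
  intro m case _ hpre
  obtain ⟨hm, hlen⟩ := hpre
  unfold Spec_septemvigesimal septemvigesimal septemvigesimal_alt
  dsimp only
  rw [pvALoop_eq m.toNat m hm rfl (m.toNat + 1) (by omega) []]
  rw [PySem.List.slice?_none_none_neg_one]
  simp only [List.nil_append, Option.getD_some, List.reverse_reverse]
  have hdig : case.toList.length ≤ ((pvDigitsB m).map pvF).length := by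
    simp only [List.length_map]
    rcases hlen with h1 | h1
    · have := pvDigitsB_length_pos m
      omega
    · have := pvDigitsB_length_ge (case.toList.length - 1) m hm h1
      omega
  rw [pvAFor_eq _ _ _ ?_]
  · simp only [List.nil_append]
    congr 1
  · intro p hp
    have := pvMem_enumerate_bounds case.toList 0 p hp
    constructor
    · omega
    · have : p.1 < (case.toList.length : Int) := by omega
      have h2 : (case.toList.length : Int) ≤ ((pvDigitsB m).map pvF).length := by exact_mod_cast hdig
      omega
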